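-- pv_equiv track=rewrite | github.com/gieseladev/giesela | musicbot/utils.py | to_timestamp
-- ===== SOURCE A (Python) =====
-- def to_timestamp(seconds):
--     sec = int(seconds)
--     s = "{0:0>2}".format(sec % 60)
--     m = (sec // 60) % 60
--     h = (sec // 60 // 60) % 24
--     d = (sec // 60 // 60 // 24)
--
--     work_string = ""
--     if d > 0:
--         return ":".join(
--             str(x) for x in (d, "{0:0>2}".format(h), "{0:0>2}".format(m), s))
--     elif h > 0:
--         return ":".join(str(x) for x in (h, "{0:0>2}".format(m), s))
--     else:
--         return ":".join(str(x) for x in (m, s))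
-- ===== SOURCE B (Python) =====
-- def to_timestamp(seconds):
--     sec = int(seconds)
--
--     def expand(n, divs):
--         # n is a remainder; emit every field below, threading remainders down
--         if not divs:
--             return [n]
--         q, r = divmod(n, divs[0])
--         return [q] + expand(r, divs[1:])
--
--     def fields(n, divs):
--         # skip leading units until one is positive (minutes always kept),
--         # then expand everything below it
--         q, r = divmod(n, divs[0])
--         if q > 0 or len(divs) == 1:
--             return [q] + expand(r, divs[1:])
--         return fields(r, divs[1:])
--
--     fs = fields(sec, (86400, 3600, 60))
--     return ":".join([str(fs[0])] + ["{0:0>2}".format(x) for x in fs[1:]])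
-- ===== Notes on version B (the rewrite author's own statement) =====
-- stated objective: alternative
-- what changed: Replaces A's independent mod-based field computation plus three explicit formatting branches with a recursive top-down peeling over a divisor list (86400,3600,60) that threads remainders via divmod, skips leading zero units recursively and expands all lower fields once one is emitted.
import Mathlib
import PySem

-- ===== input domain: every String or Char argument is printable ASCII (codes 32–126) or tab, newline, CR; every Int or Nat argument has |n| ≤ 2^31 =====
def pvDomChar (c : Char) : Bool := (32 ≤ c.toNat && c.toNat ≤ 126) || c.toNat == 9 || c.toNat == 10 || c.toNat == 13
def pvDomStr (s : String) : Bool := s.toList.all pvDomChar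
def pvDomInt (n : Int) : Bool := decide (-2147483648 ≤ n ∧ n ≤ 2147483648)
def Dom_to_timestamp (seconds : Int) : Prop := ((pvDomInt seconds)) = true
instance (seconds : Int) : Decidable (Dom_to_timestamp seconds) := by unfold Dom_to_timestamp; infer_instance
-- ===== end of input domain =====

-- B replaces A's independent mod-based fields + three branches with a recursive
-- peeling over the divisor list (86400,3600,60) threading remainders via divmod
-- (alternative decomposition, same cost).

-- ===== PORT A =====
-- "{0:0>2}".format(x) for an int x: str(x) left-padded with '0' to width 2
def pvPad2 (n : Int) : String :=
  let t := PySem.Int.toChars n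
  String.ofList (if t.length < 2 then '0' :: t else t)

def to_timestamp (seconds : Int) : String :=
  let sec := seconds                                -- sec = int(seconds)
  let s := pvPad2 (PySem.Int.mod sec 60)
  let m := PySem.Int.mod (PySem.Int.floordiv sec 60) 60
  let h := PySem.Int.mod (PySem.Int.floordiv (PySem.Int.floordiv sec 60) 60) 24
  let d := PySem.Int.floordiv (PySem.Int.floordiv (PySem.Int.floordiv sec 60) 60) 24
  if d > 0 then
    PySem.Str.join ":" [PySem.Int.toStr d, pvPad2 h, pvPad2 m, s]
  else if h > 0 then
    PySem.Str.join ":" [PySem.Int.toStr h, pvPad2 m, s]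
  else
    PySem.Str.join ":" [PySem.Int.toStr m, s]

-- ===== PORT B =====
-- `expand(n, divs)`: emit every field below, threading remainders down
def pvExpand : Int → List Int → List Int
  | n, [] => [n]
  | n, dv :: rest =>
    match PySem.Int.divmod? n dv with
    | none => []        -- unreachable: all divisors in the literal list are nonzero
    | some (q, r) => q :: pvExpand r rest

-- `fields(n, divs)`: skip leading units until one is positive (minutes always
-- kept), then expand everything below it; Python never calls it on empty divs
def pvFields : Int → List Int → List Int
  | n, [] => [n]        -- unreachable
  | n, dv :: rest =>
    match PySem.Int.divmod? n dv with
    | none => []        -- unreachable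
    | some (q, r) =>
      if q > 0 ∨ rest = [] then q :: pvExpand r rest
      else pvFields r rest

def to_timestamp_alt (seconds : Int) : String :=
  let sec := seconds                                -- sec = int(seconds)
  match pvFields sec [86400, 3600, 60] with
  | [] => ""            -- unreachable: pvFields returns a nonempty list here
  | f0 :: fs => PySem.Str.join ":" (PySem.Int.toStr f0 :: fs.map pvPad2)

-- ===== PRECONDITION & SPEC =====
def Spec_to_timestamp (seconds : Int) (out : String) : Prop := out = to_timestamp_alt seconds
instance (seconds : Int) (out : String) : Decidable (Spec_to_timestamp seconds out) := by unfold Spec_to_timestamp; infer_instance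

-- ===== CLAIM (what is proved, stated in full; the proofs are below) =====
def Claim_equal_to_timestamp : Prop := ∀ (seconds : Int), Dom_to_timestamp seconds → Spec_to_timestamp seconds (to_timestamp seconds)

-- ===== LEMMAS AND PROOFS =====
lemma pv_fmod (a b : Int) (hb : 0 ≤ b) : a.fmod b = a % b := by
  rw [Int.fmod_eq_emod]; simp [hb]

-- ===== VERDICT (by name: the statement is the Claim_ definition above) =====
theorem to_timestamp_spec : Claim_equal_to_timestamp := by
  intro seconds _
  unfold Spec_to_timestamp to_timestamp to_timestamp_alt
  simp only [pvFields, pvExpand, PySem.Int.divmod?]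
  norm_num
  simp only [Int.fdiv_eq_ediv_of_nonneg _ (by norm_num : (0:Int) ≤ 60),
             Int.fdiv_eq_ediv_of_nonneg _ (by norm_num : (0:Int) ≤ 86400),
             Int.fdiv_eq_ediv_of_nonneg _ (by norm_num : (0:Int) ≤ 3600),
             pv_fmod _ 60 (by norm_num),
             pv_fmod _ 86400 (by norm_num), pv_fmod _ 3600 (by norm_num)]
  have hd : seconds / 60 / 60 / 24 = seconds / 86400 := by omega
  have hh : seconds / 60 / 60 % 24 = seconds % 86400 / 3600 := by omega
  have hm : seconds / 60 % 60 = seconds % 86400 % 3600 / 60 := by omega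
  have hs : seconds % 60 = seconds % 86400 % 3600 % 60 := by omega
  rw [hd, hh, hm, hs]
  by_cases h1 : 0 < seconds / 86400
  · simp [h1]
  · by_cases h2 : 0 < seconds % 86400 / 3600
    · simp [h1, h2]
    · simp [h1, h2]
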